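-- pv_equiv track=rewrite | github.com/202030481266/CP-Templates-and-Solutions | Plus题目/medium/1989. 捉迷藏中可捕获的最大人数.py | catchMaximumAmountofPeople
-- ===== SOURCE A (Python) =====
-- from typing import List
--
-- def catchMaximumAmountofPeople(team: List[int], dist: int) -> int:
--     ans = 0
--     a = [i for i, v in enumerate(team) if v]
--     p = 0
--     if len(a) == 0:
--         return 0
--     for i, v in enumerate(team):
--         if not v:
--             while p < len(a) and a[p]+dist < i:
--                 p += 1
--             if p < len(a) and a[p]-dist <= i:
--                 ans += 1
--                 p += 1
--     return ans
-- ===== SOURCE B (Python) =====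
-- from typing import List
--
-- def catchMaximumAmountofPeople(team: List[int], dist: int) -> int:
--     # Suffix dynamic programme computing the MAXIMUM matching between teacher
--     # positions and kid positions with |t - k| <= dist (which the greedy attains).
--     T = [i for i, v in enumerate(team) if v]
--     K = [i for i, v in enumerate(team) if not v]
--     prev = [0] * (len(K) + 1)
--     for t in reversed(T):
--         cur = [0] * (len(K) + 1)
--         for j in range(len(K) - 1, -1, -1):
--             best = prev[j]
--             if cur[j + 1] > best:
--                 best = cur[j + 1]
--             if abs(t - K[j]) <= dist and 1 + prev[j + 1] > best:
--                 best = 1 + prev[j + 1]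
--             cur[j] = best
--         prev = cur
--     return prev[0]
-- ===== Notes on version B (the rewrite author's own statement) =====
-- stated objective: alternative
-- what changed: B replaces A's greedy single pass with a pointer by a suffix dynamic programme that computes the maximum matching between teacher and kid positions within dist (proving the greedy attains the optimum), using a rolling DP row over the kid list.
import Mathlib
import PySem

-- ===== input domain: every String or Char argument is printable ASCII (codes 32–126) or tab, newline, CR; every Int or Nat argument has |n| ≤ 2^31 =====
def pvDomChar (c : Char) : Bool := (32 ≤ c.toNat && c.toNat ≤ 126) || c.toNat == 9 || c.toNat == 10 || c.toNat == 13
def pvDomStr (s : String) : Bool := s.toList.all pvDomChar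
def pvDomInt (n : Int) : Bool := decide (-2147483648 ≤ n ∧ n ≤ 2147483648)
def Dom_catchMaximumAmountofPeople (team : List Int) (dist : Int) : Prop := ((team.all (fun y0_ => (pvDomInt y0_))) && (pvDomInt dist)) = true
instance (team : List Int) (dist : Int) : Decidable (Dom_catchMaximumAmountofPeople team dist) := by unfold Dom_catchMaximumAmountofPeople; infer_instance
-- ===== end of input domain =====

-- B computes the answer as the MAXIMUM matching between teacher and kid positions within
-- dist via a suffix dynamic programme (a rolling DP row over the kid list), a different
-- algorithm from A's greedy single pass with a teacher pointer; same result, higher cost.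

-- ===== PORT A =====
-- the inner `while p < len(a) and a[p]+dist < i: p += 1`
def pvWhileA (a : List Int) (dist : Int) (i : Int) (p : Nat) : Nat :=
  if h : p < a.length ∧ a.getD p 0 + dist < i then pvWhileA a dist i (p + 1) else p
termination_by a.length - p
decreasing_by omega

def catchMaximumAmountofPeople (team : List Int) (dist : Int) : Int :=
  -- a = [i for i, v in enumerate(team) if v]
  let a : List Int :=
    (PySem.List.enumerate team 0).filterMap (fun iv => if iv.2 ≠ 0 then some iv.1 else none)
  if a.length = 0 then 0
  else
    ((PySem.List.enumerate team 0).foldl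
      (fun (st : Int × Nat) iv =>
        if iv.2 = 0 then
          let p := pvWhileA a dist iv.1 st.2
          if p < a.length ∧ a.getD p 0 - dist ≤ iv.1 then (st.1 + 1, p + 1)
          else (st.1, p)
        else st) (0, 0)).1

-- ===== PORT B =====
-- the inner loop `for j in range(len(K)-1, -1, -1): …` filling cur[j] from prev[j],
-- cur[j+1] and prev[j+1]; transcribed as the structural recursion that builds the
-- suffix of cur head-first alongside the suffix of prev (cur[j+1] = head of the
-- already-built rest, prev[j+1] = head of the tail of prev)
def pvRowB (dist t : Int) : List Int → List Int → List Int
  | [], _ => [0]                        -- cur = [0]*(len(K)+1) with len(K) = 0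
  | _ :: _, [] => [0]                   -- unreachable: prev always has length len(K)+1
  | k :: Ks, p :: Ps =>
    let rest := pvRowB dist t Ks Ps
    let best := max p (rest.headD 0)
    (if (if t - k ≥ 0 then t - k else k - t) ≤ dist ∧ 1 + Ps.headD 0 > best
     then 1 + Ps.headD 0 else best) :: rest

def catchMaximumAmountofPeople_alt (team : List Int) (dist : Int) : Int :=
  -- T = [i for i, v in enumerate(team) if v]; K = [i for i, v in enumerate(team) if not v]
  let T : List Int :=
    (PySem.List.enumerate team 0).filterMap (fun iv => if iv.2 ≠ 0 then some iv.1 else none)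
  let K : List Int :=
    (PySem.List.enumerate team 0).filterMap (fun iv => if iv.2 = 0 then some iv.1 else none)
  -- prev = [0]*(len(K)+1);  for t in reversed(T): prev = row(t, prev)  ≡  foldr over T
  let prev := T.foldr (fun t prev => pvRowB dist t K prev) (List.replicate (K.length + 1) 0)
  prev.headD 0

-- ===== PRECONDITION & SPEC =====
def Spec_catchMaximumAmountofPeople (team : List Int) (dist : Int) (out : Int) : Prop := out = catchMaximumAmountofPeople_alt team dist
instance (team : List Int) (dist : Int) (out : Int) : Decidable (Spec_catchMaximumAmountofPeople team dist out) := by unfold Spec_catchMaximumAmountofPeople; infer_instance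

-- ===== CLAIM (what is proved, stated in full; the proofs are below) =====
def Claim_equal_catchMaximumAmountofPeople : Prop := ∀ (team : List Int) (dist : Int), Dom_catchMaximumAmountofPeople team dist → Spec_catchMaximumAmountofPeople team dist (catchMaximumAmountofPeople team dist)

-- ===== LEMMAS AND PROOFS =====

-- teacher and kid index lists extracted from the enumeration
def pvTeach (l : List (Int × Int)) : List Int := l.filterMap (fun iv => if iv.2 ≠ 0 then some iv.1 else none)
def pvKids (l : List (Int × Int)) : List Int := l.filterMap (fun iv => if iv.2 = 0 then some iv.1 else none)

-- A-side reference: the greedy as a structural recursion on the two lists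
def pvMergeL (dist : Int) : List Int → List Int → Int
  | [], _ => 0
  | _ :: _, [] => 0
  | t :: Ts, k :: Ks =>
    if t + dist < k then pvMergeL dist Ts (k :: Ks)
    else if t - dist > k then pvMergeL dist (t :: Ts) Ks
    else 1 + pvMergeL dist Ts Ks

-- B-side reference: the maximum-matching value the DP rows hold
def pvM (dist : Int) : List Int → List Int → Int
  | [], _ => 0
  | _ :: _, [] => 0
  | t :: Ts, k :: Ks =>
    let best := max (pvM dist Ts (k :: Ks)) (pvM dist (t :: Ts) Ks)
    if t - dist ≤ k ∧ k ≤ t + dist then max best (1 + pvM dist Ts Ks) else best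

theorem pvMergeL_cons (dist t k : Int) (Ts Ks : List Int) :
    pvMergeL dist (t :: Ts) (k :: Ks)
      = (if t + dist < k then pvMergeL dist Ts (k :: Ks)
         else if t - dist > k then pvMergeL dist (t :: Ts) Ks
         else 1 + pvMergeL dist Ts Ks) := by simp only [pvMergeL]

theorem pvMergeL_nilT (dist : Int) (K : List Int) : pvMergeL dist [] K = 0 := by
  simp only [pvMergeL]

theorem pvMergeL_nilK (dist : Int) (T : List Int) : pvMergeL dist T [] = 0 := by
  cases T <;> simp only [pvMergeL]

theorem pvM_cons (dist t k : Int) (Ts Ks : List Int) :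
    pvM dist (t :: Ts) (k :: Ks)
      = (if t - dist ≤ k ∧ k ≤ t + dist
         then max (max (pvM dist Ts (k :: Ks)) (pvM dist (t :: Ts) Ks)) (1 + pvM dist Ts Ks)
         else max (pvM dist Ts (k :: Ks)) (pvM dist (t :: Ts) Ks)) := by simp only [pvM]

theorem pvM_nilK (dist : Int) (T : List Int) : pvM dist T [] = 0 := by
  cases T <;> simp only [pvM]

theorem pvM_nonneg (dist : Int) (T K : List Int) : 0 ≤ pvM dist T K := by
  induction T generalizing K with
  | nil => simp only [pvM]; omega
  | cons t Ts ihT =>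
    induction K with
    | nil => rw [pvM_nilK]
    | cons k Ks ihK =>
      have h1 := ihT (k :: Ks)
      have h2 := ihT Ks
      rw [pvM_cons]
      split_ifs <;> simp only [le_max_iff] <;> omega

theorem pvM_mono_t (dist t : Int) (T K : List Int) : pvM dist T K ≤ pvM dist (t :: T) K := by
  cases K with
  | nil => rw [pvM_nilK, pvM_nilK]
  | cons k Ks =>
    rw [pvM_cons]
    split_ifs <;> simp only [le_max_iff] <;> omega

theorem pvM_mono_k (dist k : Int) (T K : List Int) : pvM dist T K ≤ pvM dist T (k :: K) := by
  cases T with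
  | nil => simp only [pvM]; omega
  | cons t Ts =>
    rw [pvM_cons]
    split_ifs <;> simp only [le_max_iff] <;> omega

theorem pvM_dropK (dist k : Int) (T K : List Int) : pvM dist T (k :: K) ≤ 1 + pvM dist T K := by
  induction T generalizing K with
  | nil => simp only [pvM]; have := pvM_nonneg dist ([] : List Int) K; omega
  | cons t Ts ih =>
    have h1 := ih (K := K)
    have h2 := pvM_mono_t dist t Ts K
    have h3 := pvM_mono_t dist t Ts K
    rw [pvM_cons]
    split_ifs <;> simp only [max_le_iff] <;> omega

theorem pvM_dropT (dist t : Int) (T K : List Int) : pvM dist (t :: T) K ≤ 1 + pvM dist T K := by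
  induction K generalizing T with
  | nil => rw [pvM_nilK, pvM_nilK]; omega
  | cons k Ks ih =>
    have h1 := ih (T := T)
    have h2 := pvM_mono_k dist k T Ks
    rw [pvM_cons]
    split_ifs <;> simp only [max_le_iff] <;> omega

-- a teacher strictly left of every kid matches nothing
theorem pvM_uselessT (dist t : Int) (T K : List Int) (h : ∀ k ∈ K, t + dist < k) :
    pvM dist (t :: T) K = pvM dist T K := by
  induction K with
  | nil => rw [pvM_nilK, pvM_nilK]
  | cons k Ks ih =>
    have hk := h k (by simp)
    have hKs : ∀ k' ∈ Ks, t + dist < k' := fun k' hm => h k' (by simp [hm])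
    rw [pvM_cons, if_neg (by omega), ih hKs]
    have := pvM_mono_k dist k T Ks
    omega

-- a kid strictly left of every teacher's window matches nothing
theorem pvM_uselessK (dist k : Int) (T K : List Int) (h : ∀ t ∈ T, t - dist > k) :
    pvM dist T (k :: K) = pvM dist T K := by
  induction T with
  | nil => simp only [pvM]
  | cons t Ts ih =>
    have ht := h t (by simp)
    have hTs : ∀ t' ∈ Ts, t' - dist > k := fun t' hm => h t' (by simp [hm])
    rw [pvM_cons, if_neg (by omega), ih hTs]
    have := pvM_mono_t dist t Ts K
    omega

-- the greedy attains the DP optimum on sorted lists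
theorem pvMergeL_eq_pvM (dist : Int) (T K : List Int)
    (hT : T.Pairwise (· ≤ ·)) (hK : K.Pairwise (· ≤ ·)) :
    pvMergeL dist T K = pvM dist T K := by
  fun_induction pvMergeL dist T K with
  | case1 K => simp only [pvM]
  | case2 t Ts => rw [pvM_nilK]
  | case3 t Ts k Ks h ih =>
    rw [List.pairwise_cons] at hT
    rw [ih hT.2 hK]
    refine (pvM_uselessT dist t Ts (k :: Ks) ?_).symm
    intro k' hk'
    rcases List.mem_cons.mp hk' with rfl | hk'
    · exact h
    · rw [List.pairwise_cons] at hK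
      have := hK.1 k' hk'
      omega
  | case4 t Ts k Ks h1 h2 ih =>
    rw [List.pairwise_cons] at hK
    rw [ih hT hK.2]
    refine (pvM_uselessK dist k (t :: Ts) Ks ?_).symm
    intro t' ht'
    rcases List.mem_cons.mp ht' with rfl | ht'
    · omega
    · rw [List.pairwise_cons] at hT
      have := hT.1 t' ht'
      omega
  | case5 t Ts k Ks h1 h2 ih =>
    rw [List.pairwise_cons] at hT
    rw [List.pairwise_cons] at hK
    rw [ih hT.2 hK.2]
    rw [pvM_cons, if_pos (by omega : t - dist ≤ k ∧ k ≤ t + dist)]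
    have hdk := pvM_dropK dist k Ts Ks
    have hdt := pvM_dropT dist t Ts Ks
    omega

-- the DP row over kid suffixes
def pvTab (dist : Int) (T : List Int) : List Int → List Int
  | [] => [pvM dist T []]
  | k :: Ks => pvM dist T (k :: Ks) :: pvTab dist T Ks

theorem pvTab_nil (dist : Int) (K : List Int) :
    pvTab dist [] K = List.replicate (K.length + 1) 0 := by
  induction K with
  | nil => simp [pvTab, pvM_nilK]
  | cons k Ks ih => simp only [pvTab, ih, List.length_cons, List.replicate_succ]; simp [pvM]

theorem pvTab_headD (dist : Int) (T K : List Int) : (pvTab dist T K).headD 0 = pvM dist T K := by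
  cases K <;> simp only [pvTab, List.headD_cons]

theorem pvRowB_tab (dist t : Int) (T K : List Int) :
    pvRowB dist t K (pvTab dist T K) = pvTab dist (t :: T) K := by
  induction K with
  | nil => simp only [pvTab, pvRowB, pvM_nilK]
  | cons k Ks ih =>
    show pvRowB dist t (k :: Ks) (pvM dist T (k :: Ks) :: pvTab dist T Ks)
        = pvM dist (t :: T) (k :: Ks) :: pvTab dist (t :: T) Ks
    simp only [pvRowB, ih]
    congr 1
    rw [pvTab_headD, pvTab_headD, pvM_cons]
    have := pvM_mono_k dist k T Ks
    have := pvM_mono_t dist t T Ks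
    split_ifs <;> omega

theorem pvFoldr_tab (dist : Int) (T K : List Int) :
    T.foldr (fun t prev => pvRowB dist t K prev) (List.replicate (K.length + 1) 0)
      = pvTab dist T K := by
  induction T with
  | nil => exact (pvTab_nil dist K).symm
  | cons t Ts ih => rw [List.foldr_cons, ih, pvRowB_tab]

-- sortedness of the extracted index lists
theorem pvTeach_sorted (team : List Int) :
    (pvTeach (PySem.List.enumerate team 0)).Pairwise (· ≤ ·) := by
  unfold pvTeach
  rw [List.pairwise_filterMap]
  refine (PySem.List.pairwise_lt_enumerate (xs := team) (s := 0)).imp ?_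
  intro a b hab
  intro x hx y hy
  split_ifs at hx hy <;> simp_all
  omega

theorem pvKids_sorted (team : List Int) :
    (pvKids (PySem.List.enumerate team 0)).Pairwise (· ≤ ·) := by
  unfold pvKids
  rw [List.pairwise_filterMap]
  refine (PySem.List.pairwise_lt_enumerate (xs := team) (s := 0)).imp ?_
  intro a b hab
  intro x hx y hy
  split_ifs at hx hy <;> simp_all
  omega

-- the kid-step of A's loop, factored out
def pvStepK (a : List Int) (dist : Int) (st : Int × Nat) (k : Int) : Int × Nat :=
  let p := pvWhileA a dist k st.2
  if p < a.length ∧ a.getD p 0 - dist ≤ k then (st.1 + 1, p + 1) else (st.1, p)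

theorem pvWhileA_props (a : List Int) (dist k : Int) (p : Nat) (hp : p ≤ a.length) :
    p ≤ pvWhileA a dist k p ∧ pvWhileA a dist k p ≤ a.length ∧
    (pvWhileA a dist k p = a.length ∨
      (pvWhileA a dist k p < a.length ∧ ¬ (a.getD (pvWhileA a dist k p) 0 + dist < k))) := by
  fun_induction pvWhileA a dist k p with
  | case1 p h ih =>
    have := ih (by omega)
    omega
  | case2 p h =>
    rw [not_and_or] at h
    rcases h with h | h
    · omega
    · rcases Nat.lt_or_ge p a.length with hl | hl
      · exact ⟨le_refl _, by omega, Or.inr ⟨hl, h⟩⟩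
      · omega

theorem pvMergeL_while (a : List Int) (dist k : Int) (K : List Int) (p : Nat) :
    pvMergeL dist (a.drop p) (k :: K) = pvMergeL dist (a.drop (pvWhileA a dist k p)) (k :: K) := by
  fun_induction pvWhileA a dist k p with
  | case1 p h ih =>
    rw [← ih]
    have hd : a.drop p = a.getD p 0 :: a.drop (p + 1) := by
      rw [List.getD_eq_getElem _ _ h.1, List.getElem_cons_drop]
    rw [hd, pvMergeL_cons, if_pos h.2]
  | case2 p h => rfl

-- main invariant: A's kid-fold counts exactly the structural greedy
theorem pvFoldK_eq (a : List Int) (dist : Int) (K : List Int) (ans : Int) (p : Nat)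
    (hp : p ≤ a.length) :
    (K.foldl (pvStepK a dist) (ans, p)).1 = ans + pvMergeL dist (a.drop p) K := by
  induction K generalizing ans p with
  | nil => simp [pvMergeL_nilK]
  | cons k Ks ih =>
    rw [List.foldl_cons]
    obtain ⟨hpq, hql, hstop⟩ := pvWhileA_props a dist k p hp
    have hmw := pvMergeL_while a dist k Ks p
    rcases hstop with hend | ⟨hlt, hge⟩
    · have hstep : pvStepK a dist (ans, p) k = (ans, pvWhileA a dist k p) := by
        unfold pvStepK
        dsimp only
        rw [if_neg]
        intro hc; omega
      rw [hstep, ih ans _ hql, hmw, hend, List.drop_length, pvMergeL_nilT, pvMergeL_nilT]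
    · have hd : a.drop (pvWhileA a dist k p)
          = a.getD (pvWhileA a dist k p) 0 :: a.drop (pvWhileA a dist k p + 1) := by
        rw [List.getD_eq_getElem _ _ hlt, List.getElem_cons_drop]
      by_cases hm : a.getD (pvWhileA a dist k p) 0 - dist ≤ k
      · have hstep : pvStepK a dist (ans, p) k = (ans + 1, pvWhileA a dist k p + 1) := by
          unfold pvStepK
          dsimp only
          rw [if_pos ⟨hlt, hm⟩]
        rw [hstep, ih (ans + 1) _ (by omega), hmw, hd, pvMergeL_cons,
          if_neg hge, if_neg (by omega)]
        omega
      · have hstep : pvStepK a dist (ans, p) k = (ans, pvWhileA a dist k p) := by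
          unfold pvStepK
          dsimp only
          rw [if_neg]
          intro hc; exact hm hc.2
        rw [hstep, ih ans _ hql, hmw, hd, pvMergeL_cons, if_neg hge,
          if_pos (by omega : a.getD (pvWhileA a dist k p) 0 - dist > k), ← hd]

-- A's pass over every position is the kid-fold: teacher entries are identity steps
theorem pvFoldA_eq (a : List Int) (dist : Int) (l : List (Int × Int)) (st : Int × Nat) :
    l.foldl (fun (st : Int × Nat) iv =>
        if iv.2 = 0 then
          let p := pvWhileA a dist iv.1 st.2
          if p < a.length ∧ a.getD p 0 - dist ≤ iv.1 then (st.1 + 1, p + 1)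
          else (st.1, p)
        else st) st
      = (pvKids l).foldl (pvStepK a dist) st := by
  induction l generalizing st with
  | nil => rfl
  | cons x xs ih =>
    rw [List.foldl_cons]
    dsimp only
    by_cases hx : x.2 = 0
    · have hk : pvKids (x :: xs) = x.1 :: pvKids xs := by
        simp [pvKids, hx]
      rw [if_pos hx, ih, hk, List.foldl_cons]
      rfl
    · have hk : pvKids (x :: xs) = pvKids xs := by
        simp [pvKids, hx]
      rw [if_neg hx, ih, hk]

-- ===== VERDICT (by name: the statement is the Claim_ definition above) =====
theorem catchMaximumAmountofPeople_spec : Claim_equal_catchMaximumAmountofPeople := by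
  intro team dist _
  show catchMaximumAmountofPeople team dist = catchMaximumAmountofPeople_alt team dist
  unfold catchMaximumAmountofPeople catchMaximumAmountofPeople_alt
  dsimp only
  rw [pvFoldA_eq, pvFoldK_eq _ dist _ 0 0 (Nat.zero_le _), List.drop_zero, pvFoldr_tab,
    pvTab_headD]
  show (if (pvTeach (PySem.List.enumerate team 0)).length = 0 then (0 : Int)
        else 0 + pvMergeL dist (pvTeach (PySem.List.enumerate team 0)) (pvKids (PySem.List.enumerate team 0)))
      = pvM dist (pvTeach (PySem.List.enumerate team 0)) (pvKids (PySem.List.enumerate team 0))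
  rw [pvMergeL_eq_pvM dist _ _ (pvTeach_sorted team) (pvKids_sorted team)]
  by_cases h : (pvTeach (PySem.List.enumerate team 0)).length = 0
  · rw [if_pos h]
    rw [List.length_eq_zero_iff] at h
    rw [h]
    simp [pvM]
  · rw [if_neg h]
    omega
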